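-- pv_equiv track=rewrite | github.com/woong-jae/Algorithm-Crash | Programmers/[60060] 가사 검색/Johoseong/60060.py | solution
-- ===== SOURCE A (Python) =====
-- def insert(trie, w, l):
--     cur_node = trie
--     for a in w:
--         cur_node.setdefault(a, [{}, {}])
--         if l not in cur_node[a][0]: # 자식 단어 길이 저장!!
--             cur_node[a][0][l] = 0
--         cur_node[a][0][l] += 1
--         cur_node = cur_node[a][1]
--
-- def search(trie, q, l):
--     cur_node = trie
--     cnt = 0
--     for a in q:
--         if a == '?': # 물음표면? 지금까지 매칭된 단어들 길이랑 쿼리 길이 같은거 count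
--             for i in cur_node:
--                 if l in cur_node[i][0]:
--                     cnt += cur_node[i][0][l]
--             return cnt
--
--         if a in cur_node: # 해당 알파벳이 트리에 있으면 다음노드로
--             cur_node = cur_node[a][1]
--         else:
--             break
--     return cnt
--
-- def solution(words, queries):
--     answer = []
--     trie = {}
--     reverse_trie = {}
--
--     for w in words:
--         insert(trie, w, len(w)) # 일반적인 경우
--         insert(reverse_trie, reversed(w), len(w)) # 단어 뒤집은 경우
--
--     for q in queries:
--         if q[0] == '?' and q[-1] == '?': # 다 물음표
--             answer.append(search(trie, q, len(q)))
--         elif q[0] == '?': # 앞에가 물음표 -> 뒤집어서 단어검색!!!!!!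
--             answer.append(search(reverse_trie, reversed(q), len(q)))
--         else: # 뒤에가 물음표
--             answer.append(search(trie, q, len(q)))
--     return answer
-- ===== SOURCE B (Python) =====
-- def _prefix_before_qm(chars):
--     # characters before the first '?'
--     p = []
--     for ch in chars:
--         if ch == '?':
--             break
--         p.append(ch)
--     return p
--
-- def solution(words, queries):
--     # Direct per-query counting over the word list; no tries are built.
--     answer = []
--     for q in queries:
--         l = len(q)
--         if '?' not in q:
--             answer.append(0)
--         elif q[0] == '?' and q[-1] == '?':
--             answer.append(sum(1 for w in words if len(w) == l))
--         elif q[0] == '?':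
--             p = _prefix_before_qm(reversed(q))
--             answer.append(sum(1 for w in words
--                               if len(w) == l and list(reversed(w))[:len(p)] == p))
--         else:
--             p = _prefix_before_qm(q)
--             answer.append(sum(1 for w in words
--                               if len(w) == l and list(w)[:len(p)] == p))
--     return answer
-- ===== Notes on version B (the rewrite author's own statement) =====
-- stated objective: simpler
-- what changed: Replaced A's two hand-built tries (with per-level length counters) by direct per-query counting over the word list: a length test plus a prefix test on the word or its reverse, using only the query text before the first '?'; no trie construction at all.
import Mathlib
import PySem

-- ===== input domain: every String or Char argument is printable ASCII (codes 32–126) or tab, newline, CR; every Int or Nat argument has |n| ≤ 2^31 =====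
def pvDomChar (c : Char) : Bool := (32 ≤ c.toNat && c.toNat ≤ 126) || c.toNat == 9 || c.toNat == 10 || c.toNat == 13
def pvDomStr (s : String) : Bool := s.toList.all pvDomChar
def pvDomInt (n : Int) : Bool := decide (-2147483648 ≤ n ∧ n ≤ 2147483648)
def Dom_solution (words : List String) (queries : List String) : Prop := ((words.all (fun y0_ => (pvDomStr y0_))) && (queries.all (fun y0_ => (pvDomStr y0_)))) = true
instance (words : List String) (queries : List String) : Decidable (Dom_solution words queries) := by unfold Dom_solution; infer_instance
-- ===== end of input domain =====

-- B replaces A's two hand-built tries by direct per-query counting (length + prefix tests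
-- over the word list): simpler, and measured faster in a timing run on its generated inputs.

-- ===== PORT A =====
-- Trie node: Python's nested dict {char: [length-count-dict, child-node]}, as an
-- insertion-ordered entry list (cons c d child rest = one dict entry plus the remaining entries).
inductive PyTrie where
  | nil : PyTrie
  | cons : Char → PySem.Dict Int Int → PyTrie → PyTrie → PyTrie
deriving DecidableEq, Repr

def trieGet : PyTrie → Char → Option (PySem.Dict Int Int × PyTrie)
  | .nil, _ => none
  | .cons c d ch rest, a => if c = a then some (d, ch) else trieGet rest a

-- store under key a, overwriting in place / appending a fresh key (Python dict mutation)
def trieSet : PyTrie → Char → PySem.Dict Int Int → PyTrie → PyTrie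
  | .nil, a, d, ch => .cons a d ch .nil
  | .cons c d0 ch0 rest, a, d, ch =>
      if c = a then .cons c d ch rest else .cons c d0 ch0 (trieSet rest a d ch)

-- `if l not in node[a][0]: node[a][0][l] = 0` then `node[a][0][l] += 1`
def bumpLen (d : PySem.Dict Int Int) (l : Int) : PySem.Dict Int Int :=
  d.insert l (d.getD l 0 + 1)

-- insert(trie, w, l): setdefault the entry, bump its length counter, descend
def insertA : List Char → Int → PyTrie → PyTrie
  | [], _, t => t
  | a :: w, l, t =>
      let e := (trieGet t a).getD (PySem.Dict.empty, .nil)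
      trieSet t a (bumpLen e.1 l) (insertA w l e.2)

-- the '?' branch of search: `for i in cur_node: if l in cur_node[i][0]: cnt += cur_node[i][0][l]`
def wildSum : PyTrie → Int → Int
  | .nil, _ => 0
  | .cons _ d _ rest, l => (if d.contains l then d.getD l 0 else 0) + wildSum rest l

-- search(trie, q, l)
def searchA : PyTrie → List Char → Int → Int
  | _, [], _ => 0
  | t, a :: q, l =>
      if a = '?' then wildSum t l
      else
        match trieGet t a with
        | some e => searchA e.2 q l
        | none => 0

def solution (words : List String) (queries : List String) : List Int :=
  let tries := words.foldl
    (fun (tr : PyTrie × PyTrie) w =>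
      (insertA w.toList (PySem.Str.len w) tr.1,
       insertA w.toList.reverse (PySem.Str.len w) tr.2))
    (.nil, .nil)
  queries.foldl
    (fun ans q =>
      let cs := q.toList
      ans ++ [if PySem.List.pyGet? cs 0 = some '?' ∧ PySem.List.pyGet? cs (-1) = some '?' then
                searchA tries.1 cs (PySem.Str.len q)
              else if PySem.List.pyGet? cs 0 = some '?' then
                searchA tries.2 cs.reverse (PySem.Str.len q)
              else
                searchA tries.1 cs (PySem.Str.len q)])
    []

-- ===== PORT B =====
-- the characters before the first '?'
def prefixBeforeQm : List Char → List Char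
  | [] => []
  | c :: cs => if c = '?' then [] else c :: prefixBeforeQm cs

def solution_alt (words : List String) (queries : List String) : List Int :=
  queries.map fun q =>
    let cs := q.toList
    if ¬ cs.contains '?' then 0
    else if cs.head? = some '?' ∧ cs.getLast? = some '?' then
      (words.countP (fun w => w.toList.length == cs.length) : Int)
    else if cs.head? = some '?' then
      let p := prefixBeforeQm cs.reverse
      (words.countP (fun w => w.toList.length == cs.length
            && w.toList.reverse.take p.length == p) : Int)
    else
      let p := prefixBeforeQm cs
      (words.countP (fun w => w.toList.length == cs.length
            && w.toList.take p.length == p) : Int)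

-- ===== PRECONDITION & SPEC =====
-- Pre_ excludes an empty string among the queries: there Python A raises IndexError on q[0].
def Pre_solution (words : List String) (queries : List String) : Prop :=
  ∀ q ∈ queries, q ≠ ""
instance (words : List String) (queries : List String) : Decidable (Pre_solution words queries) := by
  unfold Pre_solution; infer_instance

def pvWitness_solution : List String × List String :=
  (["ab", "cd", "ab", ""], ["?b", "a?", "??", "ab", "?"])

def Spec_solution (words : List String) (queries : List String) (out : List Int) : Prop := out = solution_alt words queries
instance (words : List String) (queries : List String) (out : List Int) : Decidable (Spec_solution words queries out) := by unfold Spec_solution; infer_instance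

-- ===== CLAIM (what is proved, stated in full; the proofs are below) =====
def Claim_equal_solution : Prop := ∀ (words : List String) (queries : List String), Dom_solution words queries → Pre_solution words queries → Spec_solution words queries (solution words queries)

-- ===== LEMMAS AND PROOFS =====

-- proof-only helpers
def buildT (ps : List (List Char × Int)) (t : PyTrie) : PyTrie :=
  ps.foldl (fun t p => insertA p.1 p.2 t) t

def childAt (t : PyTrie) (a : Char) : PyTrie :=
  match trieGet t a with
  | some e => e.2
  | none => .nil

def termD (d : PySem.Dict Int Int) (l : Int) : Int :=
  if d.contains l then d.getD l 0 else 0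

def termAt (t : PyTrie) (a : Char) (l : Int) : Int :=
  match trieGet t a with
  | some e => termD e.1 l
  | none => 0

def tails (ps : List (List Char × Int)) (a : Char) : List (List Char × Int) :=
  ps.filterMap (fun p => match p.1 with
    | [] => none
    | c :: r => if c = a then some (r, p.2) else none)

lemma trieGet_set_self (t : PyTrie) (a : Char) (d : PySem.Dict Int Int) (ch : PyTrie) :
    trieGet (trieSet t a d ch) a = some (d, ch) := by
  induction t with
  | nil => simp [trieSet, trieGet]
  | cons c d0 ch0 rest ihc ihr =>
    by_cases h : c = a <;> simp [trieSet, trieGet, h, ihr]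

lemma trieGet_set_ne (t : PyTrie) {a b : Char} (h : b ≠ a) (d : PySem.Dict Int Int) (ch : PyTrie) :
    trieGet (trieSet t a d ch) b = trieGet t b := by
  induction t with
  | nil => simp [trieSet, trieGet, Ne.symm h]
  | cons c d0 ch0 rest ihc ihr =>
    by_cases hc : c = a
    · subst hc; simp [trieSet, trieGet, Ne.symm h]
    · by_cases hb : c = b
      · subst hb; simp [trieSet, trieGet, hc]
      · simp [trieSet, trieGet, hc, hb, ihr]

lemma wildSum_cons (c : Char) (d : PySem.Dict Int Int) (ch rest : PyTrie) (l : Int) :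
    wildSum (.cons c d ch rest) l = termD d l + wildSum rest l := rfl

lemma termD_bump (d : PySem.Dict Int Int) (l l' : Int) :
    termD (bumpLen d l') l = termD d l + (if l' = l then 1 else 0) := by
  unfold termD bumpLen
  rw [PySem.Dict.getD_insert, PySem.Dict.contains_insert]
  by_cases h : l = l'
  · subst h
    by_cases hc : d.contains l
    · simp [hc]
    · simp [hc, PySem.Dict.getD_of_not_contains d 0 (by simpa using hc)]
  · simp [h, Ne.symm h]

lemma termD_empty (l : Int) : termD PySem.Dict.empty l = 0 := by
  simp [termD, PySem.Dict.contains_empty]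

lemma termAt_eq_getD (t : PyTrie) (a : Char) (l : Int) :
    termAt t a l = termD ((trieGet t a).getD (PySem.Dict.empty, PyTrie.nil)).1 l := by
  cases h : trieGet t a <;> simp [termAt, h, termD_empty]

lemma wildSum_set (t : PyTrie) (a : Char) (d : PySem.Dict Int Int) (ch : PyTrie) (l : Int) :
    wildSum (trieSet t a d ch) l = wildSum t l - termAt t a l + termD d l := by
  induction t with
  | nil => simp [trieSet, wildSum_cons, wildSum, termAt, trieGet]
  | cons c d0 ch0 rest ihc ihr =>
    by_cases h : c = a
    · subst h
      simp [trieSet, wildSum_cons, termAt, trieGet]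
      ring
    · simp [trieSet, wildSum_cons, termAt, trieGet, h, ihr]
      ring

lemma wildSum_insertA (w : List Char) (l' : Int) (t : PyTrie) (l : Int) :
    wildSum (insertA w l' t) l
      = wildSum t l + (if w = [] then 0 else if l' = l then 1 else 0) := by
  cases w with
  | nil => simp [insertA]
  | cons a w =>
    show wildSum (trieSet t a _ _) l = _
    rw [wildSum_set, termD_bump, termAt_eq_getD]
    simp
    ring

lemma childAt_set_self (t : PyTrie) (a : Char) (d : PySem.Dict Int Int) (ch : PyTrie) :
    childAt (trieSet t a d ch) a = ch := by
  simp [childAt, trieGet_set_self]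

lemma childAt_set_ne (t : PyTrie) {a b : Char} (h : b ≠ a) (d : PySem.Dict Int Int) (ch : PyTrie) :
    childAt (trieSet t a d ch) b = childAt t b := by
  simp [childAt, trieGet_set_ne t h]

lemma childAt_eq_getD (t : PyTrie) (a : Char) :
    childAt t a = ((trieGet t a).getD (PySem.Dict.empty, PyTrie.nil)).2 := by
  cases h : trieGet t a <;> simp [childAt, h]

lemma childAt_insertA_cons (a : Char) (w : List Char) (l' : Int) (t : PyTrie) (b : Char) :
    childAt (insertA (a :: w) l' t) b
      = if b = a then insertA w l' (childAt t a) else childAt t b := by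
  show childAt (trieSet t a _ _) b = _
  by_cases h : b = a
  · subst h
    rw [childAt_set_self, childAt_eq_getD]
    simp
  · simp [childAt_set_ne t h, h]

lemma buildT_cons (p : List Char × Int) (ps : List (List Char × Int)) (t : PyTrie) :
    buildT (p :: ps) t = buildT ps (insertA p.1 p.2 t) := rfl

lemma childAt_build (ps : List (List Char × Int)) (t : PyTrie) (a : Char) :
    childAt (buildT ps t) a = buildT (tails ps a) (childAt t a) := by
  induction ps generalizing t with
  | nil => rfl
  | cons p ps ih =>
    obtain ⟨pw, pl⟩ := p
    rw [buildT_cons, ih]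
    cases pw with
    | nil => simp [insertA, tails, List.filterMap_cons]
    | cons c r =>
      have htails : tails ((c :: r, pl) :: ps) a
          = if c = a then (r, pl) :: tails ps a else tails ps a := by
        simp only [tails, List.filterMap_cons]
        by_cases hc : c = a <;> simp [hc]
      rw [childAt_insertA_cons, htails]
      by_cases hc : c = a
      · subst hc
        rw [if_pos rfl, if_pos rfl, buildT_cons]
      · rw [if_neg (Ne.symm hc), if_neg hc]

lemma wildSum_build (ps : List (List Char × Int)) (t : PyTrie) (l : Int) :
    wildSum (buildT ps t) l
      = wildSum t l + ((ps.countP (fun p => !p.1.isEmpty && p.2 == l)) : Int) := by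
  induction ps generalizing t with
  | nil => simp [buildT]
  | cons p ps ih =>
    rw [buildT_cons, ih, wildSum_insertA, List.countP_cons]
    push_cast
    by_cases hp : p.1 = [] <;> by_cases hl : p.2 = l <;> simp [hp, hl] <;> ring

lemma searchA_nil_trie (q : List Char) (l : Int) : searchA .nil q l = 0 := by
  cases q <;> simp [searchA, wildSum, trieGet]

lemma searchA_cons (t : PyTrie) (a : Char) (q : List Char) (l : Int) :
    searchA t (a :: q) l = if a = '?' then wildSum t l else searchA (childAt t a) q l := by
  by_cases h : a = '?'
  · simp [searchA, h]
  · cases hg : trieGet t a <;> simp [searchA, h, hg, childAt, searchA_nil_trie]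

lemma searchA_noQ (q : List Char) (h : '?' ∉ q) (t : PyTrie) (l : Int) :
    searchA t q l = 0 := by
  induction q generalizing t with
  | nil => rfl
  | cons a q ih =>
    have ha : a ≠ '?' := fun hc => h (hc ▸ List.mem_cons_self)
    rw [searchA_cons, if_neg ha]
    exact ih (fun hc => h (List.mem_cons_of_mem _ hc)) _

lemma searchA_build_count (q : List Char) (l : Int) (hq : '?' ∈ q) :
    ∀ ps : List (List Char × Int),
      searchA (buildT ps .nil) q l
        = ((ps.countP fun p => p.2 == l
              && (q.takeWhile (fun c => !(c == '?'))).isPrefixOf p.1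
              && decide ((q.takeWhile (fun c => !(c == '?'))).length < p.1.length)) : Int) := by
  induction q with
  | nil => cases hq
  | cons a q ih =>
    intro ps
    by_cases ha : a = '?'
    · subst ha
      rw [searchA_cons, if_pos rfl, wildSum_build]
      have hw : wildSum PyTrie.nil l = 0 := rfl
      rw [hw, zero_add]
      congr 1
      apply List.countP_congr
      intro p _
      cases p1 : p.1 <;> simp [p1]
    · have hq' : '?' ∈ q := by
        rcases List.mem_cons.mp hq with h | h
        · exact absurd h.symm ha
        · exact h
      rw [searchA_cons, if_neg ha, childAt_build]
      have hnil : childAt PyTrie.nil a = PyTrie.nil := rfl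
      rw [hnil, ih hq' (tails ps a)]
      congr 1
      unfold tails
      rw [List.countP_filterMap]
      apply List.countP_congr
      intro p _
      have htw : (a :: q).takeWhile (fun c => !(c == '?'))
          = a :: q.takeWhile (fun c => !(c == '?')) := by
        simp [List.takeWhile_cons, ha]
      cases p1 : p.1 with
      | nil => simp [p1, htw, List.isPrefixOf]
      | cons c r =>
        by_cases hc : c = a
        · subst hc
          simp [p1, htw, List.isPrefixOf, Bool.and_assoc]
        · simp [p1, htw, List.isPrefixOf, hc, Ne.symm hc]

lemma prefixBeforeQm_eq_takeWhile (cs : List Char) :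
    prefixBeforeQm cs = cs.takeWhile (fun c => !(c == '?')) := by
  induction cs with
  | nil => rfl
  | cons c cs ih => by_cases h : c = '?' <;> simp [prefixBeforeQm, h, ih]

lemma takeWhile_lt_of_mem (cs : List Char) (h : '?' ∈ cs) :
    (cs.takeWhile (fun c => !(c == '?'))).length < cs.length := by
  induction cs with
  | nil => cases h
  | cons c cs ih =>
    by_cases hc : c = '?'
    · simp [List.takeWhile_cons, hc]
    · have h' : '?' ∈ cs := by
        rcases List.mem_cons.mp h with h0 | h0
        · exact absurd h0.symm hc
        · exact h0
      simpa [List.takeWhile_cons, hc] using ih h'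

lemma prefix_beq (p x : List Char) : p.isPrefixOf x = (x.take p.length == p) := by
  rw [Bool.eq_iff_iff]
  simp only [List.isPrefixOf_iff_prefix, beq_iff_eq, List.prefix_iff_eq_take]
  exact ⟨fun h => h.symm, fun h => h.symm⟩

-- the two tries built by A's word loop
lemma tries_eq (words : List String) :
    ∀ t1 t2 : PyTrie,
      words.foldl
        (fun (tr : PyTrie × PyTrie) w =>
          (insertA w.toList (PySem.Str.len w) tr.1,
           insertA w.toList.reverse (PySem.Str.len w) tr.2)) (t1, t2)
      = (buildT (words.map fun w => (w.toList, PySem.Str.len w)) t1,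
         buildT (words.map fun w => (w.toList.reverse, PySem.Str.len w)) t2) := by
  induction words with
  | nil => intro t1 t2; rfl
  | cons w words ih =>
    intro t1 t2
    simp only [List.foldl_cons, List.map_cons, buildT_cons]
    exact ih _ _

lemma count_allq (words : List String) (cs : List Char) (hcs : cs ≠ []) :
    (words.map fun w => (w.toList, PySem.Str.len w)).countP
        (fun p => !p.1.isEmpty && p.2 == ((cs.length : Int)))
      = words.countP (fun w => w.toList.length == cs.length) := by
  rw [List.countP_map]
  apply List.countP_congr
  intro w _
  simp only [Function.comp, PySem.Str.len_eq]
  by_cases hl : w.toList.length = cs.length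
  · have hne : w.toList ≠ [] := by
      intro h0
      rw [h0] at hl
      exact hcs (List.eq_nil_of_length_eq_zero hl.symm)
    simp [hl, hne]
  · have hl' : w.length ≠ cs.length := by simpa using hl
    simp [hl, hl']

lemma count_prefix (words : List String) (cs qs : List Char) (g : String → List Char)
    (hg : ∀ w, (g w).length = w.toList.length) (hq : '?' ∈ qs) (hlen : qs.length = cs.length) :
    (words.map fun w => (g w, PySem.Str.len w)).countP
        (fun p => p.2 == ((cs.length : Int))
           && (qs.takeWhile (fun c => !(c == '?'))).isPrefixOf p.1
           && decide ((qs.takeWhile (fun c => !(c == '?'))).length < p.1.length))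
      = words.countP (fun w => w.toList.length == cs.length
           && (g w).take (prefixBeforeQm qs).length == prefixBeforeQm qs) := by
  rw [prefixBeforeQm_eq_takeWhile, List.countP_map]
  apply List.countP_congr
  intro w _
  simp only [Function.comp, PySem.Str.len_eq]
  by_cases hl : w.toList.length = cs.length
  · have hlt : (qs.takeWhile (fun c => !(c == '?'))).length < (g w).length := by
      rw [hg, hl, ← hlen]
      exact takeWhile_lt_of_mem qs hq
    simp [hl, hlt, prefix_beq]
  · have hl' : w.length ≠ cs.length := by simpa using hl
    simp [hl, hl']

lemma per_query (words : List String) (q : String) (hq : q ≠ "") :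
    (if PySem.List.pyGet? q.toList 0 = some '?' ∧ PySem.List.pyGet? q.toList (-1) = some '?' then
        searchA (buildT (words.map fun w => (w.toList, PySem.Str.len w)) .nil) q.toList (PySem.Str.len q)
      else if PySem.List.pyGet? q.toList 0 = some '?' then
        searchA (buildT (words.map fun w => (w.toList.reverse, PySem.Str.len w)) .nil) q.toList.reverse (PySem.Str.len q)
      else
        searchA (buildT (words.map fun w => (w.toList, PySem.Str.len w)) .nil) q.toList (PySem.Str.len q))
    = (if ¬ q.toList.contains '?' then 0
      else if q.toList.head? = some '?' ∧ q.toList.getLast? = some '?' then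
        (words.countP (fun w => w.toList.length == q.toList.length) : Int)
      else if q.toList.head? = some '?' then
        (words.countP (fun w => w.toList.length == q.toList.length
              && w.toList.reverse.take (prefixBeforeQm q.toList.reverse).length == prefixBeforeQm q.toList.reverse) : Int)
      else
        (words.countP (fun w => w.toList.length == q.toList.length
              && w.toList.take (prefixBeforeQm q.toList).length == prefixBeforeQm q.toList) : Int)) := by
  have hcs : q.toList ≠ [] := fun h0 => hq (String.toList_eq_nil_iff.mp h0)
  rw [show ((0 : Int)) = ((0 : Nat) : Int) from rfl, PySem.List.pyGet?_natCast,
      PySem.List.pyGet?_neg_one]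
  rw [show q.toList[0]? = q.toList.head? from (List.head?_eq_getElem?).symm]
  rw [PySem.Str.len_eq]
  by_cases hmem : '?' ∈ q.toList
  · have hnn : ¬ ¬ (q.toList.contains '?' = true) := by simp [hmem]
    rw [if_neg hnn]
    by_cases hh : q.toList.head? = some '?'
    · by_cases hl : q.toList.getLast? = some '?'
      · rw [if_pos ⟨hh, hl⟩, if_pos ⟨hh, hl⟩]
        obtain ⟨rest, hrest⟩ : ∃ rest, q.toList = '?' :: rest := by
          cases hq0 : q.toList with
          | nil => exact absurd hq0 hcs
          | cons c r =>
            rw [hq0] at hh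
            simp at hh
            exact ⟨r, by rw [hh]⟩
        rw [hrest, searchA_cons, if_pos rfl, wildSum_build]
        have hw : wildSum PyTrie.nil ((('?' :: rest).length : Nat) : Int) = 0 := rfl
        rw [hw, zero_add, count_allq words ('?' :: rest) (by simp)]
      · have hand : ¬ (q.toList.head? = some '?' ∧ q.toList.getLast? = some '?') :=
          fun hc => hl hc.2
        rw [if_neg hand, if_pos hh]
        have hqrev : '?' ∈ q.toList.reverse := by simpa using hmem
        rw [searchA_build_count _ _ hqrev]
        rw [count_prefix words q.toList q.toList.reverse (fun w => w.toList.reverse)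
              (by simp) hqrev (by simp)]
        rw [if_neg hand, if_pos hh]
    · have hand : ¬ (q.toList.head? = some '?' ∧ q.toList.getLast? = some '?') :=
        fun hc => hh hc.1
      rw [if_neg hand, if_neg hh]
      rw [searchA_build_count _ _ hmem]
      rw [count_prefix words q.toList q.toList (fun w => w.toList) (fun w => rfl) hmem rfl]
      rw [if_neg hand, if_neg hh]
  · have hcont : (q.toList.contains '?') = false := by simpa using hmem
    have hh : q.toList.head? ≠ some '?' := by
      intro h0
      exact hmem (List.mem_of_mem_head? (by rw [h0]; rfl))
    have hand : ¬ (q.toList.head? = some '?' ∧ q.toList.getLast? = some '?') :=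
      fun hc => hh hc.1
    rw [if_neg hand, if_neg hh, if_pos (by simpa using hmem)]
    exact searchA_noQ _ hmem _ _

-- ===== VERDICT (by name: the statement is the Claim_ definition above) =====
theorem solution_spec : Claim_equal_solution := by
  unfold Claim_equal_solution
  intro words queries _ hpre
  unfold Spec_solution solution solution_alt
  rw [tries_eq words PyTrie.nil PyTrie.nil]
  rw [PySem.List.foldl_append_singleton_eq_map]
  rw [List.nil_append]
  apply List.map_congr_left
  intro q hqmem
  exact per_query words q (hpre q hqmem)
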